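-- pv_equiv track=rewrite | github.com/wumingyao/MyGeoMan | libs/utils.py | search_recent_data
-- ===== SOURCE A (Python) =====
-- def search_recent_data(train, num_of_hours, label_start_idx, num_for_predict):
--     '''
--     just like search_day_data, this function search previous hour data
--     '''
--     if label_start_idx + num_for_predict > len(train):
--         return None
--     x_idx = []
--     for i in range(1, num_of_hours + 1):
--         start_idx, end_idx = label_start_idx - i, label_start_idx - i + 1
--         if start_idx >= 0 and end_idx >= 0:
--             x_idx.append((start_idx, end_idx))
--     if len(x_idx) != num_of_hours:
--         return None
--     return list(reversed(x_idx)), (label_start_idx, label_start_idx + num_for_predict)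
-- ===== SOURCE B (Python) =====
-- def search_recent_data(train, num_of_hours, label_start_idx, num_for_predict):
--     if label_start_idx + num_for_predict > len(train):
--         return None
--     if not (num_of_hours == 0 or (num_of_hours > 0 and label_start_idx >= num_of_hours)):
--         return None
--     base = label_start_idx - num_of_hours
--     return ([(base + j, base + j + 1) for j in range(num_of_hours)],
--             (label_start_idx, label_start_idx + num_for_predict))
-- ===== Notes on version B (the rewrite author's own statement) =====
-- stated objective: simpler
-- what changed: Up-front analytic validation (window fits iff num_of_hours == 0 or 0 < num_of_hours <= label_start_idx) plus direct forward generation of the index pairs, replacing A's build-filter-recount-reverse loop.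
import Mathlib
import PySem

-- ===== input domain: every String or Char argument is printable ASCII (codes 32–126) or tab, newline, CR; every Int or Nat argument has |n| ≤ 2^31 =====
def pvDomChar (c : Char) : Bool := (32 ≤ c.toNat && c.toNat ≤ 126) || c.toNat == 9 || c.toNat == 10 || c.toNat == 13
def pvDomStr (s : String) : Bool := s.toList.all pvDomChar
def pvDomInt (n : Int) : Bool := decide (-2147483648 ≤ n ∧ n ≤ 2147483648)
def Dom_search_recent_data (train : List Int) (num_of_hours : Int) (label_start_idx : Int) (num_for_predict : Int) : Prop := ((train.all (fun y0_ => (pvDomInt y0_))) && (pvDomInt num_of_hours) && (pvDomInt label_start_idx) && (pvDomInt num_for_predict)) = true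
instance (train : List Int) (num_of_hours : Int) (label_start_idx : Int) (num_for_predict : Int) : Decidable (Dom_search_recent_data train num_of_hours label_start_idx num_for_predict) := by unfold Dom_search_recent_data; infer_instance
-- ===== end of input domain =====

-- B replaces A's build-filter-recount-reverse loop by up-front analytic validation plus
-- direct forward generation of the window (objective: simpler); same return value everywhere.

-- ===== PORT A =====
def search_recent_data (train : List Int) (num_of_hours : Int) (label_start_idx : Int) (num_for_predict : Int) : Option ((List (Int × Int)) × (Int × Int)) :=
  if label_start_idx + num_for_predict > (train.length : Int) then none
  else
    let x_idx := (PySem.List.pyRange 1 (num_of_hours + 1) 1).foldl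
      (fun acc i =>
        let start_idx := label_start_idx - i
        let end_idx := label_start_idx - i + 1
        if start_idx ≥ 0 ∧ end_idx ≥ 0 then acc ++ [(start_idx, end_idx)] else acc)
      ([] : List (Int × Int))
    if (x_idx.length : Int) ≠ num_of_hours then none
    else some (x_idx.reverse, (label_start_idx, label_start_idx + num_for_predict))

-- ===== PORT B =====
def search_recent_data_alt (train : List Int) (num_of_hours : Int) (label_start_idx : Int) (num_for_predict : Int) : Option ((List (Int × Int)) × (Int × Int)) :=
  if label_start_idx + num_for_predict > (train.length : Int) then none
  else if ¬ (num_of_hours = 0 ∨ (num_of_hours > 0 ∧ label_start_idx ≥ num_of_hours)) then none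
  else
    let base := label_start_idx - num_of_hours
    some ((PySem.List.pyRange 0 num_of_hours 1).map (fun j => (base + j, base + j + 1)),
          (label_start_idx, label_start_idx + num_for_predict))

-- ===== PRECONDITION & SPEC =====
def Spec_search_recent_data (train : List Int) (num_of_hours : Int) (label_start_idx : Int) (num_for_predict : Int) (out : Option ((List (Int × Int)) × (Int × Int))) : Prop := out = search_recent_data_alt train num_of_hours label_start_idx num_for_predict
instance (train : List Int) (num_of_hours : Int) (label_start_idx : Int) (num_for_predict : Int) (out : Option ((List (Int × Int)) × (Int × Int))) : Decidable (Spec_search_recent_data train num_of_hours label_start_idx num_for_predict out) := by unfold Spec_search_recent_data; infer_instance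

-- ===== CLAIM (what is proved, stated in full; the proofs are below) =====
def Claim_equal_search_recent_data : Prop := ∀ (train : List Int) (num_of_hours : Int) (label_start_idx : Int) (num_for_predict : Int), Dom_search_recent_data train num_of_hours label_start_idx num_for_predict → Spec_search_recent_data train num_of_hours label_start_idx num_for_predict (search_recent_data train num_of_hours label_start_idx num_for_predict)

-- ===== LEMMAS AND PROOFS =====

-- A's loop over range(1, n+1) as a function of the (nonnegative) trip count n.
def srdLoop (l : Int) (n : Nat) : List (Int × Int) :=
  (PySem.List.pyRange 1 ((n : Int) + 1) 1).foldl
    (fun acc i =>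
      let start_idx := l - i
      let end_idx := l - i + 1
      if start_idx ≥ 0 ∧ end_idx ≥ 0 then acc ++ [(start_idx, end_idx)] else acc)
    ([] : List (Int × Int))

lemma srdLoop_succ (l : Int) (n : Nat) :
    srdLoop l (n + 1) =
      if l - ((n : Int) + 1) ≥ 0 ∧ l - ((n : Int) + 1) + 1 ≥ 0
      then srdLoop l n ++ [(l - ((n : Int) + 1), l - ((n : Int) + 1) + 1)]
      else srdLoop l n := by
  unfold srdLoop
  have h1 : ((n : Int) + 1 + 1) = ((n : Int) + 1) + 1 := by ring
  rw [show ((n + 1 : Nat) : Int) + 1 = ((n : Int) + 1) + 1 by push_cast; ring,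
      PySem.List.pyRange_one_succ_right (by omega), List.foldl_append]
  simp

lemma srdLoop_len (l : Int) (n : Nat) :
    ((srdLoop l n).length : Int) = min (n : Int) (max l 0) := by
  induction n with
  | zero =>
      unfold srdLoop
      rw [PySem.List.pyRange_one_eq_nil (by omega)]
      simp
  | succ n ih =>
      rw [srdLoop_succ]
      split_ifs with h
      · simp only [List.length_append, List.length_singleton]
        push_cast
        omega
      · push_cast at *
        omega

lemma srdLoop_full (l : Int) (n : Nat) (h : (n : Int) ≤ l) :
    (srdLoop l n).reverse =
      (List.range n).map (fun j : Nat => (l - (n : Int) + (j : Int), l - (n : Int) + (j : Int) + 1)) := by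
  induction n with
  | zero =>
      unfold srdLoop
      rw [PySem.List.pyRange_one_eq_nil (by omega)]
      simp
  | succ n ih =>
      rw [srdLoop_succ]
      have hc : l - ((n : Int) + 1) ≥ 0 ∧ l - ((n : Int) + 1) + 1 ≥ 0 := by
        push_cast at h; omega
      rw [if_pos hc, List.reverse_append, List.reverse_singleton,
          List.singleton_append, List.range_succ_eq_map, List.map_cons,
          List.map_map, ih (by omega)]
      congr 1
      · simp only [Prod.mk.injEq]; push_cast; omega
      · apply List.map_congr_left
        intro j _
        simp only [Function.comp_apply, Prod.mk.injEq]
        push_cast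
        omega

-- ===== VERDICT (by name: the statement is the Claim_ definition above) =====
theorem search_recent_data_spec : Claim_equal_search_recent_data := by
  intro train h l p _
  unfold Spec_search_recent_data search_recent_data search_recent_data_alt
  by_cases hg : l + p > (train.length : Int)
  · simp [hg]
  rw [if_neg hg, if_neg hg]
  by_cases hneg : h < 0
  · -- loop empty, length 0 ≠ h → none; B's guard fails → none
    have hx : PySem.List.pyRange 1 (h + 1) 1 = [] :=
      PySem.List.pyRange_one_eq_nil (by omega)
    rw [hx]
    simp only [List.foldl_nil, List.length_nil, Int.natCast_zero]
    rw [if_pos (by omega), if_pos (by omega)]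
  -- h ≥ 0 : write h = ↑n
  obtain ⟨n, rfl⟩ : ∃ n : Nat, h = (n : Int) :=
    ⟨h.toNat, (Int.toNat_of_nonneg (by omega)).symm⟩
  have hloop : (PySem.List.pyRange 1 ((n : Int) + 1) 1).foldl
      (fun acc i =>
        let start_idx := l - i
        let end_idx := l - i + 1
        if start_idx ≥ 0 ∧ end_idx ≥ 0 then acc ++ [(start_idx, end_idx)] else acc)
      ([] : List (Int × Int)) = srdLoop l n := rfl
  rw [hloop]
  by_cases hok : (n : Int) = 0 ∨ ((n : Int) > 0 ∧ l ≥ (n : Int))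
  · -- window fits: both return the same some
    have hlen : ((srdLoop l n).length : Int) = (n : Int) := by
      rw [srdLoop_len]; omega
    rw [if_neg (by omega), if_neg (not_not_intro hok)]
    have hfull : (n : Int) ≤ l ∨ n = 0 := by omega
    have hrev : (srdLoop l n).reverse =
        (List.range n).map (fun j : Nat => (l - (n : Int) + (j : Int), l - (n : Int) + (j : Int) + 1)) := by
      rcases hfull with hf | hf
      · exact srdLoop_full l n hf
      · subst hf
        unfold srdLoop
        rw [PySem.List.pyRange_one_eq_nil (by omega)]
        simp
    simp only [hrev, PySem.List.pyRange_zero_nat, List.map_map]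
    rfl
  · -- 0 < n and l < n: loop is short → A none; B's guard fails → none
    have hlen : ((srdLoop l n).length : Int) ≠ (n : Int) := by
      rw [srdLoop_len]; omega
    rw [if_pos hlen, if_pos hok]
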